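-- pv_equiv track=rewrite | github.com/SamarthMahendra/low-level-Design | Samples/1a.py | process
-- ===== SOURCE A (Python) =====
-- def process(url: str) -> str:
--     url_parts = url.split("/")
--     minor_parts = []
--     for part in url_parts:
--         temp = part.split(".")
--         minor_parts.append(temp)
--     res = []
--     for part in minor_parts:
--         temp = []
--         for minor in part:
--             minor = minor[0] + str(len(minor)-2) + minor[-1]
--             temp.append(minor)
--         res.append(temp)
--
--     result = []
--     for part in res:
--         result.append('.'.join(part))
--
--     return '/'.join(result)
-- ===== SOURCE B (Python) =====
-- def _abbrev(t):
--     return t[0] + str(len(t) - 2) + t[-1]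
--
-- def process(url: str) -> str:
--     out = []
--     token = []
--     for ch in url:
--         if ch == '/' or ch == '.':
--             out.append(_abbrev(''.join(token)))
--             out.append(ch)
--             token = []
--         else:
--             token.append(ch)
--     out.append(_abbrev(''.join(token)))
--     return ''.join(out)
-- ===== Notes on version B (the rewrite author's own statement) =====
-- stated objective: alternative
-- what changed: Replaces A's two-level split ('/' then '.'), nested abbreviation loops and separate join passes with a single left-to-right character scan that emits each abbreviated token and each delimiter as it is reached.
import Mathlib
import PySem

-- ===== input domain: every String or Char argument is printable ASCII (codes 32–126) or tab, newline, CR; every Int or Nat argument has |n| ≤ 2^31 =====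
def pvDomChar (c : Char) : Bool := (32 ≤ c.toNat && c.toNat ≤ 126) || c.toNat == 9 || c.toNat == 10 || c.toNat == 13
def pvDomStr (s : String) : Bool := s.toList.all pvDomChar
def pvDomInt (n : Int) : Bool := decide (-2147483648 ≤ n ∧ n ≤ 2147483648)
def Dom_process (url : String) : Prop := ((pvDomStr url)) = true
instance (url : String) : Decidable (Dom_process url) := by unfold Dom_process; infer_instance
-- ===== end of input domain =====

-- B replaces A's two-level split / nested abbreviation loops / separate join passes with one
-- left-to-right character scan emitting abbreviated tokens and delimiters as reached (alternative
-- decomposition, same complexity). Both Pythons raise IndexError on an empty token; Pre_ excludes those inputs.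

-- ===== PORT A =====
def process (url : String) : String :=
  let url_parts := PySem.Chars.splitOn url.toList ['/']
  let minor_parts := url_parts.foldl (fun acc part => acc ++ [PySem.Chars.splitOn part ['.']]) []
  let res := minor_parts.foldl (fun acc part =>
      acc ++ [part.foldl (fun temp minor =>
        temp ++ [((PySem.List.pyGet? minor 0).getD ' ') ::
                 (PySem.Int.toChars ((minor.length : Int) - 2) ++
                  [(PySem.List.pyGet? minor (-1)).getD ' '])]) []]) []
  let result := res.foldl (fun acc part => acc ++ [PySem.Chars.join ['.'] part]) []
  String.ofList (PySem.Chars.join ['/'] result)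

-- ===== PORT B =====
def pvIsSep (c : Char) : Bool := c == '/' || c == '.'

def pvAbbrev (t : List Char) : List Char :=
  ((PySem.List.pyGet? t 0).getD ' ') ::
  (PySem.Int.toChars ((t.length : Int) - 2) ++ [(PySem.List.pyGet? t (-1)).getD ' '])

def pvScan : List Char → List Char → List Char
  | [], tok => pvAbbrev tok
  | c :: rest, tok =>
      if pvIsSep c then pvAbbrev tok ++ c :: pvScan rest []
      else pvScan rest (tok ++ [c])

def process_alt (url : String) : String := String.ofList (pvScan url.toList [])

-- ===== PRECONDITION & SPEC =====
-- Pre_ excludes exactly the inputs with an empty token (adjacent, leading or trailing '/'/'.'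
-- separators, or the empty string), on which Python A raises IndexError (and B does too).
def pvOkTok : List Char → Bool
  | [] => false
  | c :: cs => !pvIsSep c && pvOkRest cs
where pvOkRest : List Char → Bool
  | [] => true
  | c :: cs => if pvIsSep c then pvOkTok cs else pvOkRest cs

def Pre_process (url : String) : Prop := pvOkTok url.toList = true
instance (url : String) : Decidable (Pre_process url) := by unfold Pre_process; infer_instance

def pvWitness_process : String := "a.b"

def Spec_process (url : String) (out : String) : Prop := out = process_alt url
instance (url : String) (out : String) : Decidable (Spec_process url out) := by unfold Spec_process; infer_instance

-- ===== CLAIM (what is proved, stated in full; the proofs are below) =====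
def Claim_equal_process : Prop := ∀ (url : String), Dom_process url → Pre_process url → Spec_process url (process url)

-- ===== LEMMAS AND PROOFS =====

-- single-char split, structurally recursive (proved equal to PySem.Chars.splitOn on [s])
def split1 (sep : Char) : List Char → List (List Char)
  | [] => [[]]
  | c :: cs =>
      if c = sep then [] :: split1 sep cs
      else
        match split1 sep cs with
        | [] => [[c]]
        | h :: t => (c :: h) :: t

theorem split1_ne_nil (sep : Char) (l : List Char) : split1 sep l ≠ [] := by
  cases l with
  | nil => simp [split1]
  | cons c cs =>
    simp only [split1]
    split_ifs
    · simp
    · cases h : split1 sep cs <;> simp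

theorem go_single (s : Char) (fuel : Nat) (l cur : List Char) (acc : List (List Char))
    (h : l.length < fuel) :
    PySem.Chars.splitOn.go [s] fuel l cur acc =
      acc.reverse ++ (match split1 s l with
        | [] => [cur.reverse]
        | h :: t => (cur.reverse ++ h) :: t) := by
  induction fuel generalizing l cur acc with
  | zero => omega
  | succ n ih =>
    cases l with
    | nil => simp [PySem.Chars.splitOn.go, split1]
    | cons c cs =>
      rw [PySem.Chars.splitOn.go]
      by_cases hc : c = s
      · subst hc
        have hp : List.isPrefixOf [c] (c :: cs) = true := by simp [List.isPrefixOf]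
        rw [if_pos hp]
        simp only [List.length_singleton, List.drop_succ_cons, List.drop_zero]
        simp only [List.length_cons] at h
        rw [ih cs [] (cur.reverse :: acc) (by omega)]
        simp only [split1]
        cases hs : split1 c cs with
        | nil => exact absurd hs (split1_ne_nil c cs)
        | cons h2 t2 => simp
      · have hp : List.isPrefixOf [s] (c :: cs) = false := by
          simp [List.isPrefixOf]
          exact fun hsc => absurd hsc.symm hc
        rw [if_neg (by simp [hp])]
        simp only [List.length_cons] at h
        rw [ih cs (c :: cur) acc (by omega)]
        simp only [split1, if_neg hc]
        cases hs : split1 s cs with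
        | nil => exact absurd hs (split1_ne_nil s cs)
        | cons h2 t2 => simp

theorem splitOn_single (s : Char) (l : List Char) :
    PySem.Chars.splitOn l [s] = split1 s l := by
  rw [PySem.Chars.splitOn, go_single s (l.length + 1) l [] [] (by omega)]
  cases hs : split1 s l with
  | nil => exact absurd hs (split1_ne_nil s l)
  | cons h t => simp

-- the common normal form both ports compute
def pvF (cs : List Char) : List Char :=
  PySem.Chars.join ['/']
    ((split1 '/' cs).map (fun p => PySem.Chars.join ['.'] ((split1 '.' p).map pvAbbrev)))

theorem process_eq_pvF (url : String) : process url = String.ofList (pvF url.toList) := by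
  unfold process pvF
  simp only [PySem.List.foldl_append_singleton_eq_map, List.nil_append, List.map_map,
    splitOn_single]
  rfl

theorem split1_no_sep (s : Char) (l : List Char) (h : ∀ c ∈ l, c ≠ s) :
    split1 s l = [l] := by
  induction l with
  | nil => simp [split1]
  | cons c cs ih =>
    simp only [split1, if_neg (h c (by simp))]
    rw [ih (fun d hd => h d (by simp [hd]))]

theorem split1_append_no_sep (s : Char) (pre l : List Char) (h : ∀ c ∈ pre, c ≠ s) :
    split1 s (pre ++ l) =
      match split1 s l with
      | [] => [pre]
      | h :: t => (pre ++ h) :: t := by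
  induction pre with
  | nil =>
    cases hs : split1 s l with
    | nil => exact absurd hs (split1_ne_nil s l)
    | cons h2 t2 => simp [hs]
  | cons c cs ih =>
    simp only [List.cons_append, split1, if_neg (h c (by simp))]
    rw [ih (fun d hd => h d (by simp [hd]))]
    cases hs : split1 s l with
    | nil => exact absurd hs (split1_ne_nil s l)
    | cons h2 t2 => simp

theorem pvF_no_sep (tok : List Char) (h : ∀ c ∈ tok, pvIsSep c = false) :
    pvF tok = pvAbbrev tok := by
  unfold pvF
  rw [split1_no_sep '/' tok (fun c hc => by
        have := h c hc; simp [pvIsSep] at this; exact fun he => this.1 he)]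
  simp only [List.map_cons, List.map_nil, PySem.Chars.join_singleton]
  rw [split1_no_sep '.' tok (fun c hc => by
        have := h c hc; simp [pvIsSep] at this; exact fun he => this.2 he)]
  simp [PySem.Chars.join_singleton]

theorem pvScan_eq_pvF (cs : List Char) : ∀ tok, (∀ c ∈ tok, pvIsSep c = false) →
    pvScan cs tok = pvF (tok ++ cs) := by
  induction cs with
  | nil =>
    intro tok h
    simp only [pvScan, List.append_nil]
    exact (pvF_no_sep tok h).symm
  | cons c rest ih =>
    intro tok h
    by_cases hsep : pvIsSep c = true
    · have hscan : pvScan (c :: rest) tok = pvAbbrev tok ++ c :: pvScan rest [] := by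
        simp [pvScan, hsep]
      rw [hscan, ih [] (by simp), List.nil_append]
      have htok' : ∀ d ∈ tok, d ≠ '/' := fun d hd => by
        have := h d hd; simp [pvIsSep] at this; exact fun he => this.1 he
      have htokD : ∀ d ∈ tok, d ≠ '.' := fun d hd => by
        have := h d hd; simp [pvIsSep] at this; exact fun he => this.2 he
      simp only [pvIsSep, Bool.or_eq_true, beq_iff_eq] at hsep
      cases hs : split1 '/' rest with
      | nil => exact absurd hs (split1_ne_nil '/' rest)
      | cons p ps =>
      rcases hsep with hc | hc
      · subst hc
        -- c = '/'
        have h1 : split1 '/' (tok ++ '/' :: rest) = tok :: p :: ps := by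
          rw [split1_append_no_sep '/' tok _ htok']
          have h2 : split1 '/' ('/' :: rest) = [] :: p :: ps := by
            simp [split1, hs]
          rw [h2]
          simp
        unfold pvF
        rw [h1, hs]
        simp only [List.map_cons, PySem.Chars.join_cons_cons]
        rw [split1_no_sep '.' tok htokD]
        simp [PySem.Chars.join_singleton]
      · subst hc
        -- c = '.'
        have h1 : split1 '/' (tok ++ '.' :: rest) = (tok ++ '.' :: p) :: ps := by
          rw [split1_append_no_sep '/' tok _ htok']
          have h2 : split1 '/' ('.' :: rest) = ('.' :: p) :: ps := by
            simp [split1, hs]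
          rw [h2]
        have h2 : split1 '.' (tok ++ '.' :: p) = tok :: split1 '.' p := by
          rw [split1_append_no_sep '.' tok _ htokD]
          have h3 : split1 '.' ('.' :: p) = [] :: split1 '.' p := by
            simp [split1]
          rw [h3]
          simp
        unfold pvF
        rw [h1, hs, List.map_cons, List.map_cons, h2, List.map_cons]
        cases hq : split1 '.' p with
        | nil => exact absurd hq (split1_ne_nil '.' p)
        | cons q qs =>
          simp only [List.map_cons, PySem.Chars.join_cons_cons]
          cases ps with
          | nil =>
            simp only [List.map_nil, PySem.Chars.join_singleton]
            simp
          | cons p2 ps2 =>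
            simp only [List.map_cons, PySem.Chars.join_cons_cons]
            simp
    · have hscan : pvScan (c :: rest) tok = pvScan rest (tok ++ [c]) := by
        simp [pvScan, hsep]
      rw [hscan, ih (tok ++ [c]) (by
        intro d hd
        rcases List.mem_append.mp hd with hd | hd
        · exact h d hd
        · simp at hd; subst hd; simpa using hsep)]
      simp

-- ===== VERDICT (by name: the statement is the Claim_ definition above) =====
theorem process_spec : Claim_equal_process := by
  intro url _ _
  unfold Spec_process
  rw [process_eq_pvF, process_alt, pvScan_eq_pvF url.toList [] (by simp)]
  simp
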